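-- pv_equiv track=rewrite | github.com/edwarddubi/BdmDcToPink | main.py | wep_frags_needed
-- ===== SOURCE A (Python) =====
-- wep_coins_cost = 920
--
-- def get_coins_with_comma(total_coins_needed):
--     total_coins_needed = str(total_coins_needed)
--     i = len(total_coins_needed) - 1
--     with_comma = ""
--     j = 0
--     while(i >= 0):
--         if(j == 3):
--             with_comma = "," + with_comma
--             j = 0
--         with_comma = total_coins_needed[i] + with_comma
--         j+=1
--         i-=1
--     return with_comma
--
-- def wep_frags_needed(frags):
--     max_frag = 900
--     wb = ["k", "d", "n"]
--     res = ""
--     c = 0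
--     for frag in frags:
--         if frag > max_frag:
--             frag = max_frag
--         frags_to_obtain = max_frag - frag
--         coins = get_coins_with_comma(frags_to_obtain * wep_coins_cost)
--
--         res += "{0}: You need {1} frags more. Coins needed to buy exact frags = {2}\n".format(wb[c], frags_to_obtain, coins)
--         c+=1
--     return res
-- ===== SOURCE B (Python) =====
-- def wep_frags_needed(frags):
--     lines = []
--     for w, frag in zip("kdn", frags):
--         need = max(900 - frag, 0)
--         lines.append("{0}: You need {1} frags more. Coins needed to buy exact frags = {2:,}\n".format(w, need, need * 920))
--     return "".join(lines)
-- ===== Notes on version B (the rewrite author's own statement) =====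
-- stated objective: idiomatic
-- what changed: B replaces the manual index-counter loop with a zip over the label string and closed-form max for the cap, and the hand-rolled digit-by-digit comma insertion with the builtin thousands-separator format '{:,}'.
import Mathlib
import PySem

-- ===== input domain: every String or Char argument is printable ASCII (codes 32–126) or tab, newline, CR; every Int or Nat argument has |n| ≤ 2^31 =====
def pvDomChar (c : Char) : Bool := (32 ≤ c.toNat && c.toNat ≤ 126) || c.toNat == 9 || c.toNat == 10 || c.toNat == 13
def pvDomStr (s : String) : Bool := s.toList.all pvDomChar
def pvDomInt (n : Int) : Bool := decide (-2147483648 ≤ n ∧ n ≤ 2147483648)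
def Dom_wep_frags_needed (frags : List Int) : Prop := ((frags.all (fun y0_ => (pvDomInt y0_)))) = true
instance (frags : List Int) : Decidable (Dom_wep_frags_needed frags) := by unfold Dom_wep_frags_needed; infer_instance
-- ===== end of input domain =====

-- B replaces the manual digit-counter comma loop with builtin thousands-separator formatting
-- and the cap-then-subtract with a closed-form max, zipping labels with frags (idiomatic, same cost).

-- ===== PORT A =====
-- while-loop of get_coins_with_comma: i runs from len-1 down to 0 (recursion on i+1),
-- accumulator with_comma : List Char (string concatenation), j the since-last-comma counter.
def gcwcLoop (s : List Char) : Nat → List Char → Nat → List Char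
  | 0, w, _ => w
  | n+1, w, j =>
    let wj := if j == 3 then (',' :: w, 0) else (w, j)
    -- s.getD n ' ': index n is always in range here (i counts down from len-1), exact for Python's s[i]
    gcwcLoop s n (s.getD n ' ' :: wj.1) (wj.2 + 1)

def get_coins_with_comma (total_coins_needed : Int) : String :=
  let s := (PySem.Int.toStr total_coins_needed).toList
  String.ofList (gcwcLoop s s.length [] 0)

def wep_frags_needed (frags : List Int) : String :=
  (frags.foldl (fun (st : String × Nat) frag =>
      let frag2 := if frag > 900 then 900 else frag
      let fto := 900 - frag2
      let coins := get_coins_with_comma (fto * 920)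
      (st.1 ++ ((PySem.List.pyGet? (["k", "d", "n"] : List String) (st.2 : Int)).getD "")
            ++ ": You need " ++ PySem.Int.toStr fto
            ++ " frags more. Coins needed to buy exact frags = " ++ coins ++ "\n",
       st.2 + 1))
    ("", 0)).1

-- ===== PORT B =====
-- port of Python's builtin format(n, ','): digits grouped in threes from the right
-- (exact for n ≥ 0, the only values B formats).
def commaGroup : List Char → Nat → List Char
  | [], _ => []
  | c :: rest, j => if j == 3 then ',' :: c :: commaGroup rest 1 else c :: commaGroup rest (j + 1)

def commaFmt (n : Int) : String :=
  String.ofList (commaGroup (PySem.Int.toStr n).toList.reverse 0).reverse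

def wep_frags_needed_alt (frags : List Int) : String :=
  String.join ((List.zip ["k", "d", "n"] frags).map (fun p =>
    let need := max (900 - p.2) 0
    p.1 ++ ": You need " ++ PySem.Int.toStr need
        ++ " frags more. Coins needed to buy exact frags = " ++ commaFmt (need * 920) ++ "\n"))

-- ===== PRECONDITION & SPEC =====
-- Pre_ excludes lists longer than 3, on which A raises IndexError at wb[c].
def Pre_wep_frags_needed (frags : List Int) : Prop := frags.length ≤ 3
instance (frags : List Int) : Decidable (Pre_wep_frags_needed frags) := by
  unfold Pre_wep_frags_needed; infer_instance

def pvWitness_wep_frags_needed : List Int := [100, 901, -3]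

def Spec_wep_frags_needed (frags : List Int) (out : String) : Prop := out = wep_frags_needed_alt frags
instance (frags : List Int) (out : String) : Decidable (Spec_wep_frags_needed frags out) := by unfold Spec_wep_frags_needed; infer_instance

-- ===== CLAIM (what is proved, stated in full; the proofs are below) =====
def Claim_equal_wep_frags_needed : Prop := ∀ (frags : List Int), Dom_wep_frags_needed frags → Pre_wep_frags_needed frags → Spec_wep_frags_needed frags (wep_frags_needed frags)

-- ===== LEMMAS AND PROOFS =====

-- A's descending-index loop equals B's grouping pass over the reversed digit list.
theorem gcwcLoop_eq_commaGroup (s : List Char) :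
    ∀ (n : Nat) (w : List Char) (j : Nat), n ≤ s.length →
      gcwcLoop s n w j = (commaGroup (s.take n).reverse j).reverse ++ w := by
  intro n
  induction n with
  | zero => intro w j _; simp [gcwcLoop, commaGroup]
  | succ n ih =>
    intro w j hn
    have hlt : n < s.length := by omega
    have htake : (s.take (n+1)).reverse = s.getD n ' ' :: (s.take n).reverse := by
      rw [List.take_add_one]
      simp [List.getD, List.getElem?_eq_getElem hlt]
    rw [htake, gcwcLoop, commaGroup]
    by_cases hj : j = 3
    · simp only [hj]
      rw [ih _ _ (by omega)]
      simp
    · simp only [beq_iff_eq, hj, if_false]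
      rw [ih _ _ (by omega)]
      simp

theorem gcwc_eq_commaFmt (n : Int) : get_coins_with_comma n = commaFmt n := by
  show String.ofList (gcwcLoop (PySem.Int.toStr n).toList (PySem.Int.toStr n).toList.length [] 0) = _
  rw [gcwcLoop_eq_commaGroup _ _ _ _ (le_refl _)]
  simp [commaFmt]

-- the per-element pieces agree: cap-then-subtract = max closed form
theorem fto_eq_need (frag : Int) :
    (900 - (if frag > 900 then 900 else frag)) = max (900 - frag) 0 := by
  split_ifs <;> omega

-- ===== VERDICT (by name: the statement is the Claim_ definition above) =====
theorem wep_frags_needed_spec : Claim_equal_wep_frags_needed := by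
  intro frags _ hpre
  unfold Spec_wep_frags_needed
  unfold Pre_wep_frags_needed at hpre
  match frags, hpre with
  | [], _ =>
      simp [wep_frags_needed, wep_frags_needed_alt, String.join]
  | [a], _ =>
      simp [wep_frags_needed, wep_frags_needed_alt, String.join,
        fto_eq_need, gcwc_eq_commaFmt, String.append_assoc]
  | [a, b], _ =>
      simp [wep_frags_needed, wep_frags_needed_alt, String.join,
        fto_eq_need, gcwc_eq_commaFmt, String.append_assoc]
  | [a, b, c], _ =>
      simp [wep_frags_needed, wep_frags_needed_alt, String.join,
        fto_eq_need, gcwc_eq_commaFmt, String.append_assoc]
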